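-- pv_equiv track=rewrite | github.com/0Khattab/CPL_Project | functional_Project.py | set_queen
-- ===== SOURCE A (Python) =====
-- def set_queen(board, row, col, r=0):
--     if r == len(board):
--         return ()
--     current_row = board[r]
--     if r == row:
--         new_row = set_value_in_row(current_row, col)
--         return (new_row,) + set_queen(board, row, col, r + 1)
--     else:
--         return (current_row,) + set_queen(board, row, col, r + 1)
--
-- def set_value_in_row(row, col, c=0):
--     if c == len(row):
--         return ()
--     if c == col:
--         return (1,) + set_value_in_row(row, col, c + 1)
--     return (row[c],) + set_value_in_row(row, col, c + 1)
-- ===== SOURCE B (Python) =====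
-- def set_queen(board, row, col, r=0):
--     n = len(board)
--     return tuple(
--         tuple(1 if c == col else x for c, x in enumerate(board[i])) if i == row
--         else board[i]
--         for i in range(r, n)
--     )
-- ===== Notes on version B (the rewrite author's own statement) =====
-- stated objective: idiomatic
-- what changed: Two mutually recursive cons-building helpers are replaced by a single map over range(r, n) that keeps unchanged rows as-is and rebuilds only the target row via enumerate, substituting 1 at column col.
import Mathlib
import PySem

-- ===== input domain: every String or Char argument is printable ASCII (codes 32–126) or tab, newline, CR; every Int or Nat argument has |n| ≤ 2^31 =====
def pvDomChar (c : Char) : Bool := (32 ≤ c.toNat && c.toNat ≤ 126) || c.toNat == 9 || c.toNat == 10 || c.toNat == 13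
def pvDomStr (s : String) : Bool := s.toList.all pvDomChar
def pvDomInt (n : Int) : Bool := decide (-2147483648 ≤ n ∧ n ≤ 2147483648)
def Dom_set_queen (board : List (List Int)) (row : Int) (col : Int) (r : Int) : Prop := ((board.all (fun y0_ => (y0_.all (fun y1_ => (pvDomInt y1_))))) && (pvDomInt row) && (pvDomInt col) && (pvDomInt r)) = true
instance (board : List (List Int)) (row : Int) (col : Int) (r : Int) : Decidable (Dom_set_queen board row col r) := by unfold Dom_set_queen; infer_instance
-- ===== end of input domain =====

-- B replaces A's two mutually recursive cons-building helpers by a single map over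
-- range(r, n), rebuilding only the target row (idiomatic; same cost).

-- ===== PORT A =====
-- helper: set_value_in_row(row, col, c) — recursion on c until c == len(row).
-- The 'else []' branch is a totalization guard: Python raises IndexError or diverges
-- when c is outside [0, len(row)], which is unreachable from the call with c = 0.
def set_value_in_row (row : List Int) (col : Int) (c : Int) : List Int :=
  if c = (row.length : Int) then []
  else if h : 0 ≤ c ∧ c < (row.length : Int) then
    (if c = col then (1 : Int) else (PySem.List.pyGet? row c).getD 0)
      :: set_value_in_row row col (c + 1)
  else []
termination_by ((row.length : Int) - c).toNat
decreasing_by omega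

-- The 'else []' branch is a totalization guard: Python raises IndexError there
-- (r > len(board) or r < -len(board)); those inputs are excluded by Pre_set_queen.
def set_queen (board : List (List Int)) (row : Int) (col : Int) (r : Int) : List (List Int) :=
  if r = (board.length : Int) then []
  else if h : -(board.length : Int) ≤ r ∧ r < (board.length : Int) then
    let current_row := (PySem.List.pyGet? board r).getD []
    if r = row then set_value_in_row current_row col 0 :: set_queen board row col (r + 1)
    else current_row :: set_queen board row col (r + 1)
  else []
termination_by ((board.length : Int) - r).toNat
decreasing_by all_goals omega

-- ===== PORT B =====
-- tuple(tuple(1 if c == col else x for c, x in enumerate(board[i])) if i == row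
--       else board[i] for i in range(r, len(board)))
-- board[i] is in range for every i in range(r, n) whenever -n ≤ r (Pre_); getD [] totalizes.
def set_queen_alt (board : List (List Int)) (row : Int) (col : Int) (r : Int) : List (List Int) :=
  (PySem.List.pyRange r (board.length : Int) 1).map fun i =>
    let rowi := (PySem.List.pyGet? board i).getD []
    if i = row then (PySem.List.enumerate rowi 0).map (fun p => if p.1 = col then (1 : Int) else p.2)
    else rowi

-- ===== PRECONDITION & SPEC =====
-- A raises IndexError when r > len(board) (board[r] is hit before the r == len stop)
-- or r < -len(board); exactly those inputs are excluded.
def Pre_set_queen (board : List (List Int)) (row : Int) (col : Int) (r : Int) : Prop :=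
  -(board.length : Int) ≤ r ∧ r ≤ (board.length : Int)
instance (board : List (List Int)) (row : Int) (col : Int) (r : Int) : Decidable (Pre_set_queen board row col r) := by unfold Pre_set_queen; infer_instance

def pvWitness_set_queen : List (List Int) × Int × Int × Int := ([[0, 0], [0, 0]], 1, 0, 0)

def Spec_set_queen (board : List (List Int)) (row : Int) (col : Int) (r : Int) (out : List (List Int)) : Prop := out = set_queen_alt board row col r
instance (board : List (List Int)) (row : Int) (col : Int) (r : Int) (out : List (List Int)) : Decidable (Spec_set_queen board row col r out) := by unfold Spec_set_queen; infer_instance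

-- ===== CLAIM (what is proved, stated in full; the proofs are below) =====
def Claim_equal_set_queen : Prop := ∀ (board : List (List Int)) (row : Int) (col : Int) (r : Int), Dom_set_queen board row col r → Pre_set_queen board row col r → Spec_set_queen board row col r (set_queen board row col r)

-- ===== LEMMAS AND PROOFS =====

-- A's row helper, started at index k ≤ len, is B's enumerate-map over the remaining suffix.
lemma svr_eq_enum (row : List Int) (col : Int) (k : Nat) (hk : k ≤ row.length) :
    set_value_in_row row col (k : Int)
      = (PySem.List.enumerate (row.drop k) (k : Int)).map
          (fun p => if p.1 = col then (1 : Int) else p.2) := by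
  induction hn : row.length - k generalizing k with
  | zero =>
    have hek : k = row.length := by omega
    subst hek
    rw [set_value_in_row]
    simp
  | succ m ih =>
    have hlt : k < row.length := by omega
    rw [set_value_in_row]
    have h1 : ¬ ((k : Int) = (row.length : Int)) := by exact_mod_cast (by omega : ¬ k = row.length)
    have h2 : 0 ≤ (k : Int) ∧ (k : Int) < (row.length : Int) := by
      constructor <;> [positivity; exact_mod_cast hlt]
    rw [if_neg h1, dif_pos h2]
    have hdrop : row.drop k = row[k] :: row.drop (k + 1) := List.drop_eq_getElem_cons hlt
    rw [hdrop, PySem.List.enumerate_cons, List.map_cons]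
    have hget : PySem.List.pyGet? row (k : Int) = some row[k] := by
      rw [PySem.List.pyGet?_natCast]; exact List.getElem?_eq_getElem hlt
    have htail := ih (k + 1) (by omega) (by omega)
    push_cast at htail ⊢
    rw [htail, hget]
    rfl

-- A = B for every start index r with -len ≤ r ≤ len.
lemma sq_eq_alt (board : List (List Int)) (row col : Int) :
    ∀ (r : Int), -(board.length : Int) ≤ r → r ≤ (board.length : Int) →
      set_queen board row col r = set_queen_alt board row col r := by
  intro r hlo hhi
  induction hn : ((board.length : Int) - r).toNat generalizing r with
  | zero =>
    have he : r = (board.length : Int) := by omega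
    rw [set_queen, if_pos he, set_queen_alt, he, PySem.List.pyRange_one_eq_nil le_rfl]
    rfl
  | succ m ih =>
    have hlt : r < (board.length : Int) := by omega
    rw [set_queen, if_neg (by omega), dif_pos ⟨hlo, hlt⟩]
    rw [set_queen_alt, PySem.List.pyRange_one_cons hlt, List.map_cons]
    have htail : set_queen board row col (r + 1) = set_queen_alt board row col (r + 1) :=
      ih (r + 1) (by omega) (by omega) (by omega)
    rw [htail, set_queen_alt]
    by_cases hr : r = row
    · rw [if_pos hr]
      simp only [hr]
      congr 1
      have := svr_eq_enum ((PySem.List.pyGet? board row).getD []) col 0 (Nat.zero_le _)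
      simpa using this
    · rw [if_neg hr]
      simp only [if_neg hr]

-- ===== VERDICT (by name: the statement is the Claim_ definition above) =====
theorem set_queen_spec : Claim_equal_set_queen := by
  intro board row col r _ hpre
  unfold Spec_set_queen
  exact sq_eq_alt board row col r hpre.1 hpre.2
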